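-- pv_equiv track=rewrite | github.com/chrisbannan93/bedrockMCAgent_v1 | sfmc-campaign-agent-repo/tools/sfmc-health-inspector/lambda/handler.py | _allowed_methods_for_path
-- ===== SOURCE A (Python) =====
-- from typing import Any, Dict, Optional, Tuple, List
--
-- SUPPORTED_ROUTES = {
--     "GET": {"/healthz", "/healthreport", "/health", "/report"},
--     "POST": {"/healthreport", "/health", "/report"},
-- }
--
-- def _allowed_methods_for_path(path_lower: str) -> List[str]:
--     p = (path_lower or "").strip().lower()
--     if not p:
--         return []
--     allowed = []
--     for m, paths in SUPPORTED_ROUTES.items():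
--         if p in paths:
--             allowed.append(m)
--     return sorted(allowed)
-- ===== SOURCE B (Python) =====
-- from typing import List
--
-- def _allowed_methods_for_path(path_lower: str) -> List[str]:
--     p = (path_lower or "").strip().lower()
--     if p == "/healthz":
--         return ["GET"]
--     if p in ("/healthreport", "/health", "/report"):
--         return ["GET", "POST"]
--     return []
-- ===== Notes on version B (the rewrite author's own statement) =====
-- stated objective: simpler
-- what changed: Replaced the loop over SUPPORTED_ROUTES with membership tests and a final sort by a direct two-branch conditional chain that returns the pre-sorted method list for each known path literal (no dict, no loop, no sort, no separate empty-string guard).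
import Mathlib
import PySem

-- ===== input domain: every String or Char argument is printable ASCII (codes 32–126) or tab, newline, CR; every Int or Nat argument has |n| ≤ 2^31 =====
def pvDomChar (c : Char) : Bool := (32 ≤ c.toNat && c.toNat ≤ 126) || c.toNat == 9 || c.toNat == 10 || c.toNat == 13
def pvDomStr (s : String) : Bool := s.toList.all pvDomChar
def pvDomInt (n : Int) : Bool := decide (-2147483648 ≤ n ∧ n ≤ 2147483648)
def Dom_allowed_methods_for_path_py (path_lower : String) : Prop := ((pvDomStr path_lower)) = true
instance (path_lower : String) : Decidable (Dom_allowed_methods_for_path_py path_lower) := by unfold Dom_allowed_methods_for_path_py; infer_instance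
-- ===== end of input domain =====

-- ===== PORT A =====
-- B replaces A's loop-over-routes + membership test + final sort by a direct conditional
-- chain returning the pre-sorted method list per known path literal (simpler; same values).
-- SUPPORTED_ROUTES, ported as an ordered list of (method, set-of-paths)
def pvSupportedRoutes : List (String × PySem.Set String) :=
  [("GET",  PySem.Set.ofList ["/healthz", "/healthreport", "/health", "/report"]),
   ("POST", PySem.Set.ofList ["/healthreport", "/health", "/report"])]

def allowed_methods_for_path_py (path_lower : String) : List String :=
  let p := PySem.Str.lower (PySem.Str.strip path_lower)
  if p = "" then []
  else
    let allowed := pvSupportedRoutes.foldl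
      (fun acc mp => if PySem.Set.contains mp.2 p then acc ++ [mp.1] else acc) []
    PySem.List.sorted allowed (fun x => x) false

-- ===== PORT B =====
def allowed_methods_for_path_py_alt (path_lower : String) : List String :=
  let p := PySem.Str.lower (PySem.Str.strip path_lower)
  if p = "/healthz" then ["GET"]
  else if p = "/healthreport" ∨ p = "/health" ∨ p = "/report" then ["GET", "POST"]
  else []

-- ===== PRECONDITION & SPEC =====
def Spec_allowed_methods_for_path_py (path_lower : String) (out : List String) : Prop := out = allowed_methods_for_path_py_alt path_lower
instance (path_lower : String) (out : List String) : Decidable (Spec_allowed_methods_for_path_py path_lower out) := by unfold Spec_allowed_methods_for_path_py; infer_instance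

-- ===== CLAIM (what is proved, stated in full; the proofs are below) =====
def Claim_equal_allowed_methods_for_path_py : Prop := ∀ (path_lower : String), Dom_allowed_methods_for_path_py path_lower → Spec_allowed_methods_for_path_py path_lower (allowed_methods_for_path_py path_lower)

-- ===== LEMMAS AND PROOFS =====
-- core fact: for every normalized string p, A's scan-and-sort equals B's conditional chain
theorem pv_core (p : String) :
    (if p = "" then [] else
      PySem.List.sorted (pvSupportedRoutes.foldl
        (fun acc mp => if PySem.Set.contains mp.2 p then acc ++ [mp.1] else acc) [])
        (fun x => x) false)
    = (if p = "/healthz" then ["GET"]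
       else if p = "/healthreport" ∨ p = "/health" ∨ p = "/report" then ["GET", "POST"]
       else ([] : List String)) := by
  by_cases h1 : p = "/healthz"
  · subst h1
    simp [pvSupportedRoutes, PySem.Set.ofList, PySem.Set.add, PySem.Set.contains,
          PySem.List.sorted, PySem.List.insertBy]
  · by_cases h2 : p = "/healthreport"
    · subst h2
      simp [pvSupportedRoutes, PySem.Set.ofList, PySem.Set.add, PySem.Set.contains,
            PySem.List.sorted, PySem.List.insertBy] <;> decide
    · by_cases h3 : p = "/health"
      · subst h3
        simp [pvSupportedRoutes, PySem.Set.ofList, PySem.Set.add, PySem.Set.contains,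
              PySem.List.sorted, PySem.List.insertBy] <;> decide
      · by_cases h4 : p = "/report"
        · subst h4
          simp [pvSupportedRoutes, PySem.Set.ofList, PySem.Set.add, PySem.Set.contains,
                PySem.List.sorted, PySem.List.insertBy] <;> decide
        · by_cases h0 : p = ""
          · simp [h0]
          · simp [h0, h1, h2, h3, h4, pvSupportedRoutes,
                  PySem.Set.ofList, PySem.Set.add, PySem.Set.contains,
                  PySem.List.sorted]

-- ===== VERDICT (by name: the statement is the Claim_ definition above) =====
theorem allowed_methods_for_path_py_spec : Claim_equal_allowed_methods_for_path_py := by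
  intro path_lower _
  unfold Spec_allowed_methods_for_path_py allowed_methods_for_path_py allowed_methods_for_path_py_alt
  exact pv_core (PySem.Str.lower (PySem.Str.strip path_lower))
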